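-- pv_equiv track=rewrite | github.com/tobiasseidel/RotaryArchiv | src/rotary_archiv/ocr/comparison.py | _detect_common_ocr_errors
-- ===== SOURCE A (Python) =====
-- def _detect_common_ocr_errors(text: str) -> dict[str, int]:
--     """
--     Erkenne häufige OCR-Fehler-Indikatoren
--
--     Args:
--         text: OCR-Text
--
--     Returns:
--         Dict mit Fehler-Indikatoren und deren Häufigkeit
--     """
--     errors = {
--         "consecutive_spaces": text.count("  "),
--         "isolated_chars": sum(
--             1 for word in text.split() if len(word) == 1 and word.isalnum()
--         ),
--         "mixed_case_words": sum(
--             1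
--             for word in text.split()
--             if word and word[0].islower() and any(c.isupper() for c in word[1:])
--         ),
--         "numbers_in_words": sum(
--             1
--             for word in text.split()
--             if any(c.isdigit() for c in word) and any(c.isalpha() for c in word)
--         ),
--     }
--     return errors
-- ===== SOURCE B (Python) =====
-- def _detect_common_ocr_errors(text: str) -> dict[str, int]:
--     """Single character-level scan (a small state machine) instead of text.count plus
--     three passes over text.split(): counts double spaces and classifies each word on
--     the fly from per-word flags, never materialising the word list."""
--     consecutive_spaces = isolated_chars = mixed_case_words = numbers_in_words = 0
--     pending = False  # an unpaired space has been seen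
--     wlen = 0
--     first = ""
--     upper_after = has_digit = has_alpha = False
--     for c in text + "\n":  # sentinel whitespace flushes the final word
--         if c == " ":
--             if pending:
--                 consecutive_spaces += 1
--                 pending = False
--             else:
--                 pending = True
--         else:
--             pending = False
--         if c.isspace():
--             if wlen:
--                 if wlen == 1 and first.isalnum():
--                     isolated_chars += 1
--                 if first.islower() and upper_after:
--                     mixed_case_words += 1
--                 if has_digit and has_alpha:
--                     numbers_in_words += 1
--             wlen = 0
--             upper_after = has_digit = has_alpha = False
--         else:
--             if wlen == 0:
--                 first = c
--             elif c.isupper():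
--                 upper_after = True
--             if c.isdigit():
--                 has_digit = True
--             if c.isalpha():
--                 has_alpha = True
--             wlen += 1
--     return {
--         "consecutive_spaces": consecutive_spaces,
--         "isolated_chars": isolated_chars,
--         "mixed_case_words": mixed_case_words,
--         "numbers_in_words": numbers_in_words,
--     }
-- ===== Notes on version B (the rewrite author's own statement) =====
-- stated objective: alternative
-- what changed: Replaces A's text.count plus three generator passes over text.split() with a single character-level state machine that never builds the word list: it streams over the characters once, pairing spaces with a pending flag and classifying each word at its closing whitespace from per-word flags (length, first char, upper-after-first, has-digit, has-alpha).
import Mathlib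
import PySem

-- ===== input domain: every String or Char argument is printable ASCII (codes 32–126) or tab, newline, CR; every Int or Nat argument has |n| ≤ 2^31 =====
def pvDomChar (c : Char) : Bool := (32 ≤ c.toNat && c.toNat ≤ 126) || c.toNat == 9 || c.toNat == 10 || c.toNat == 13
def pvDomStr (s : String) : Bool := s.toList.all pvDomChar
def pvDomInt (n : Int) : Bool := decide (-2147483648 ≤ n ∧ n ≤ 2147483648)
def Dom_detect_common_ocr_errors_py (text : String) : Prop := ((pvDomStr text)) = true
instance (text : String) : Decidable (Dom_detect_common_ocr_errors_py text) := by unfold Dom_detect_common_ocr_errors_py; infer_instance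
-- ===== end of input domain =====

-- B replaces A's text.count plus three passes over text.split() with a single
-- character-level state machine (alternative decomposition, same asymptotic cost).

-- ===== PORT A =====
-- 'len(word) == 1 and word.isalnum()'
def pvA_isolated (w : List Char) : Bool :=
  PySem.Chars.len w == 1 && PySem.Chars.strIsalnum w
-- 'word and word[0].islower() and any(c.isupper() for c in word[1:])'
def pvA_mixed (w : List Char) : Bool :=
  !w.isEmpty && (PySem.Chars.pyGet? w 0).elim false PySem.Chars.islower
    && (PySem.Chars.slice w (some 1) none).any PySem.Chars.isupper
-- 'any(c.isdigit() for c in word) and any(c.isalpha() for c in word)'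
def pvA_numword (w : List Char) : Bool :=
  w.any PySem.Chars.isdigit && w.any PySem.Chars.isalpha

def detect_common_ocr_errors_py (text : String) : List (String × Int) :=
  [("consecutive_spaces", (PySem.Chars.count text.toList "  ".toList : Int)),
   ("isolated_chars",
      ((PySem.Chars.split₀ text.toList).map (fun w => if pvA_isolated w then (1 : Int) else 0)).sum),
   ("mixed_case_words",
      ((PySem.Chars.split₀ text.toList).map (fun w => if pvA_mixed w then (1 : Int) else 0)).sum),
   ("numbers_in_words",
      ((PySem.Chars.split₀ text.toList).map (fun w => if pvA_numword w then (1 : Int) else 0)).sum)]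

-- ===== PORT B =====
-- the loop state of Source B's single pass: the pending-space flag, the per-word flags
-- and the four counters
structure PVSt where
  pend : Bool      -- pending: an unpaired space seen
  wlen : Nat       -- wlen
  first : Char     -- first (Source B's '' initial is never read: guarded by wlen)
  upA : Bool       -- upper_after
  hasD : Bool      -- has_digit
  hasA : Bool      -- has_alpha
  cs : Int         -- consecutive_spaces
  iso : Int        -- isolated_chars
  mix : Int        -- mixed_case_words
  nw : Int         -- numbers_in_words
deriving Repr, DecidableEq

-- the body of Source B's 'for c in text + "\n":' loop, step for step
def pvBStep (s : PVSt) (c : Char) : PVSt :=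
  let s :=
    if c == ' ' then
      if s.pend then { s with cs := s.cs + 1, pend := false }
      else { s with pend := true }
    else { s with pend := false }
  if PySem.Chars.isspace c then
    let s :=
      if s.wlen ≠ 0 then
        { s with
          iso := if s.wlen == 1 && PySem.Chars.isalnum s.first then s.iso + 1 else s.iso,
          mix := if PySem.Chars.islower s.first && s.upA then s.mix + 1 else s.mix,
          nw  := if s.hasD && s.hasA then s.nw + 1 else s.nw }
      else s
    { s with wlen := 0, upA := false, hasD := false, hasA := false }
  else
    { s with
      first := if s.wlen == 0 then c else s.first,
      upA := if s.wlen == 0 then s.upA else (s.upA || PySem.Chars.isupper c),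
      hasD := s.hasD || PySem.Chars.isdigit c,
      hasA := s.hasA || PySem.Chars.isalpha c,
      wlen := s.wlen + 1 }

def pvB_init : PVSt := ⟨false, 0, ' ', false, false, false, 0, 0, 0, 0⟩

def detect_common_ocr_errors_py_alt (text : String) : List (String × Int) :=
  let r := (text.toList ++ ['\n']).foldl pvBStep pvB_init
  [("consecutive_spaces", r.cs),
   ("isolated_chars", r.iso),
   ("mixed_case_words", r.mix),
   ("numbers_in_words", r.nw)]

-- ===== PRECONDITION & SPEC =====
def Spec_detect_common_ocr_errors_py (text : String) (out : List (String × Int)) : Prop := out = detect_common_ocr_errors_py_alt text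
instance (text : String) (out : List (String × Int)) : Decidable (Spec_detect_common_ocr_errors_py text out) := by unfold Spec_detect_common_ocr_errors_py; infer_instance

-- ===== CLAIM (what is proved, stated in full; the proofs are below) =====
def Claim_equal_detect_common_ocr_errors_py : Prop := ∀ (text : String), Dom_detect_common_ocr_errors_py text → Spec_detect_common_ocr_errors_py text (detect_common_ocr_errors_py text)

-- ===== LEMMAS AND PROOFS =====

-- number of non-overlapping "  " occurrences, consumed left to right
def pvNpairs : List Char → Nat
  | [] => 0
  | [_] => 0
  | c :: d :: t => if c = ' ' ∧ d = ' ' then 1 + pvNpairs t else pvNpairs (d :: t)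

lemma pv_npairs_cons_of_ne (c : Char) (t : List Char) (h : c ≠ ' ') :
    pvNpairs (c :: t) = pvNpairs t := by
  match t with
  | [] => rfl
  | d :: ts => simp [pvNpairs, h]

lemma pv_count_go : ∀ (fuel : Nat) (l : List Char) (acc : Nat), l.length ≤ fuel →
    PySem.Chars.count.go [' ', ' '] fuel l acc = acc + pvNpairs l := by
  intro fuel
  induction fuel with
  | zero =>
    intro l acc h
    have : l = [] := List.eq_nil_of_length_eq_zero (Nat.le_zero.mp h)
    subst this
    simp [PySem.Chars.count.go, pvNpairs]
  | succ f ih =>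
    intro l acc h
    match l with
    | [] => simp [PySem.Chars.count.go, pvNpairs]
    | c :: t =>
      by_cases hp : List.isPrefixOf [' ', ' '] (c :: t)
      · match t, hp with
        | t' :: ts, hp =>
          have hc : ' ' = c ∧ ' ' = t' := by
            simpa [List.isPrefixOf, and_assoc] using hp
          obtain ⟨rfl, rfl⟩ := hc
          rw [show PySem.Chars.count.go [' ', ' '] (f + 1) (' ' :: ' ' :: ts) acc
               = PySem.Chars.count.go [' ', ' '] f ts (acc + 1) by
                simp [PySem.Chars.count.go, hp]]
          rw [ih ts (acc + 1) (by simp at h; omega)]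
          simp [pvNpairs]; omega
        | [], hp => simp [List.isPrefixOf] at hp
      · rw [show PySem.Chars.count.go [' ', ' '] (f + 1) (c :: t) acc
             = PySem.Chars.count.go [' ', ' '] f t acc by
              simp [PySem.Chars.count.go, hp]]
        rw [ih t acc (Nat.le_of_succ_le_succ h)]
        congr 1
        rcases Decidable.em (c = ' ') with rfl | hcne
        · match t with
          | [] => rfl
          | d :: ts =>
            have hd : ¬ d = ' ' := by
              intro hh; subst hh; exact hp (by simp [List.isPrefixOf])
            simp [pvNpairs, hd]
        · exact (pv_npairs_cons_of_ne c t hcne).symm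

-- the streamed pair count equals A's text.count("  ")
lemma pv_count_eq (l : List Char) :
    PySem.Chars.count l [' ', ' '] = pvNpairs l := by
  simpa [PySem.Chars.count] using pv_count_go l.length l 0 le_rfl

-- split₀.go's accumulator is a prefix of its result
lemma pv_split_go_acc (l : List Char) : ∀ (cur : List Char) (acc : List (List Char)),
    PySem.Chars.split₀.go l cur acc = acc.reverse ++ PySem.Chars.split₀.go l cur [] := by
  induction l with
  | nil =>
    intro cur acc
    by_cases hc : cur.isEmpty <;> simp [PySem.Chars.split₀.go, hc]
  | cons c t ih =>
    intro cur acc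
    by_cases hs : PySem.Chars.isspace c
    · by_cases hc : cur.isEmpty
      · rw [show PySem.Chars.split₀.go (c :: t) cur acc
             = PySem.Chars.split₀.go t [] acc by simp [PySem.Chars.split₀.go, hs, hc],
            show PySem.Chars.split₀.go (c :: t) cur []
             = PySem.Chars.split₀.go t [] [] by simp [PySem.Chars.split₀.go, hs, hc]]
        exact ih [] acc
      · rw [show PySem.Chars.split₀.go (c :: t) cur acc
             = PySem.Chars.split₀.go t [] (cur.reverse :: acc) by simp [PySem.Chars.split₀.go, hs, hc],
            show PySem.Chars.split₀.go (c :: t) cur []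
             = PySem.Chars.split₀.go t [] [cur.reverse] by simp [PySem.Chars.split₀.go, hs, hc],
            ih [] (cur.reverse :: acc), ih [] [cur.reverse]]
        simp
    · simp only [show ∀ a, PySem.Chars.split₀.go (c :: t) cur a
           = PySem.Chars.split₀.go t (c :: cur) a by intro a; simp [PySem.Chars.split₀.go, hs]]
      exact ih (c :: cur) acc

-- A's word predicates, read off B's per-word flags (cur is the reversed current word)
lemma pv_iso_rev (cur : List Char) (h : cur ≠ []) :
    pvA_isolated cur.reverse = (cur.length == 1 && PySem.Chars.isalnum (cur.getLastD ' ')) := by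
  match cur with
  | [c] => simp [pvA_isolated, PySem.Chars.len, PySem.Chars.strIsalnum]
  | c :: d :: t =>
    simp [pvA_isolated, PySem.Chars.len]
    exact fun hx => absurd hx (by omega)

lemma pv_mixed_rev (cur : List Char) (h : cur ≠ []) :
    pvA_mixed cur.reverse
      = (PySem.Chars.islower (cur.getLastD ' ') && cur.dropLast.any PySem.Chars.isupper) := by
  rcases List.eq_nil_or_concat cur with rfl | ⟨ys, c, rfl⟩
  · exact absurd rfl h
  · simp [pvA_mixed, PySem.Chars.slice, PySem.List.slice_from, PySem.Chars.pyGet?,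
      PySem.List.pyGet?, PySem.List.pyIdx?]

lemma pv_num_rev (cur : List Char) :
    pvA_numword cur.reverse = (cur.any PySem.Chars.isdigit && cur.any PySem.Chars.isalpha) := by
  simp [pvA_numword]

-- B's flags describe the reversed current word cur
def PVRel (s : PVSt) (cur : List Char) : Prop :=
  s.wlen = cur.length ∧
  s.upA = cur.dropLast.any PySem.Chars.isupper ∧
  s.hasD = cur.any PySem.Chars.isdigit ∧
  s.hasA = cur.any PySem.Chars.isalpha ∧
  (cur ≠ [] → s.first = cur.getLastD ' ')

-- what one whitespace step does to the state (the flush of the current word)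
set_option maxRecDepth 65536 in
lemma pv_flush (s : PVSt) (c : Char) (hsp : PySem.Chars.isspace c = true) :
    (pvBStep s c).wlen = 0 ∧ (pvBStep s c).upA = false ∧
    (pvBStep s c).hasD = false ∧ (pvBStep s c).hasA = false ∧
    (pvBStep s c).pend = (c == ' ' && !s.pend) ∧
    (pvBStep s c).cs = (if c == ' ' && s.pend then s.cs + 1 else s.cs) ∧
    (pvBStep s c).iso = (if s.wlen ≠ 0 ∧ (s.wlen == 1 && PySem.Chars.isalnum s.first) then s.iso + 1 else s.iso) ∧
    (pvBStep s c).mix = (if s.wlen ≠ 0 ∧ (PySem.Chars.islower s.first && s.upA) then s.mix + 1 else s.mix) ∧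
    (pvBStep s c).nw  = (if s.wlen ≠ 0 ∧ (s.hasD && s.hasA) then s.nw + 1 else s.nw) := by
  cases hc : c == ' ' <;> cases hp : s.pend <;> by_cases hw : s.wlen = 0 <;>
    simp only [pvBStep, hc, hp, hsp, hw, Bool.false_eq_true, Bool.and_true,
      Bool.and_false, Bool.not_true, Bool.not_false, if_true, if_false, ne_eq,
      not_true_eq_false, not_false_eq_true, true_and, false_and, reduceIte] <;>
    refine ⟨rfl, rfl, rfl, rfl, rfl, ?_, ?_, ?_, ?_⟩ <;>
    simp [hw]

-- what one non-whitespace step does to the state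
lemma pv_word (s : PVSt) (c : Char) (hsp : PySem.Chars.isspace c = false) :
    (pvBStep s c).wlen = s.wlen + 1 ∧
    (pvBStep s c).first = (if s.wlen = 0 then c else s.first) ∧
    (pvBStep s c).upA = (if s.wlen = 0 then s.upA else (s.upA || PySem.Chars.isupper c)) ∧
    (pvBStep s c).hasD = (s.hasD || PySem.Chars.isdigit c) ∧
    (pvBStep s c).hasA = (s.hasA || PySem.Chars.isalpha c) ∧
    (pvBStep s c).pend = false ∧
    (pvBStep s c).cs = s.cs ∧ (pvBStep s c).iso = s.iso ∧
    (pvBStep s c).mix = s.mix ∧ (pvBStep s c).nw = s.nw := by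
  have hc : (c == ' ') = false := by
    cases h : c == ' ' with
    | false => rfl
    | true =>
      have hce : c = ' ' := by simpa using h
      subst hce
      exact absurd hsp (by decide)
  by_cases hw : s.wlen = 0 <;> simp [pvBStep, hsp, hc, hw]

-- one whitespace step, seen by the streamed pair count
lemma pv_np_step (c : Char) (t : List Char) (p : Bool) :
    (pvNpairs (if p then ' ' :: c :: t else c :: t) : Int)
      = (if (c == ' ' && p) then 1 else 0)
        + (pvNpairs (if (c == ' ' && !p) then ' ' :: t else t) : Int) := by
  by_cases hc : c = ' '
  · subst hc
    cases p <;> simp [pvNpairs]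
  · have hcb : (c == ' ') = false := by simpa using hc
    cases p <;> simp [hcb, pv_npairs_cons_of_ne c t hc, pvNpairs, hc]

-- one whitespace step, seen by the three word counts: it flushes cur.reverse
lemma pv_countP_flush (p : List Char → Bool) (t cur : List Char) (c : Char)
    (hsp : PySem.Chars.isspace c = true) :
    ((PySem.Chars.split₀.go (c :: t) cur []).countP p : Int)
      = (if cur ≠ [] ∧ p cur.reverse then 1 else 0)
        + ((PySem.Chars.split₀.go t [] []).countP p : Int) := by
  by_cases hc : cur = []
  · subst hc
    simp [PySem.Chars.split₀.go, hsp]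
  · have he : cur.isEmpty = false := by simpa using hc
    rw [show PySem.Chars.split₀.go (c :: t) cur []
         = PySem.Chars.split₀.go t [] [cur.reverse] by simp [PySem.Chars.split₀.go, hsp, he],
       pv_split_go_acc]
    simp only [List.reverse_cons, List.reverse_nil, List.nil_append, List.singleton_append,
      List.countP_cons]
    by_cases hpw : p cur.reverse <;> simp [hpw, hc] <;> push_cast <;> ring

-- the single fold computes the double-space count and the three word counts at once
lemma pv_main (l : List Char) : ∀ (cur : List Char) (s : PVSt), PVRel s cur →
    ((l ++ ['\n']).foldl pvBStep s).cs = s.cs + (pvNpairs (if s.pend then ' ' :: l else l) : Int) ∧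
    ((l ++ ['\n']).foldl pvBStep s).iso = s.iso + ((PySem.Chars.split₀.go l cur []).countP pvA_isolated : Int) ∧
    ((l ++ ['\n']).foldl pvBStep s).mix = s.mix + ((PySem.Chars.split₀.go l cur []).countP pvA_mixed : Int) ∧
    ((l ++ ['\n']).foldl pvBStep s).nw  = s.nw  + ((PySem.Chars.split₀.go l cur []).countP pvA_numword : Int) := by
  induction l with
  | nil =>
    intro cur s hrel
    obtain ⟨hw, hu, hd, ha, hf⟩ := hrel
    obtain ⟨_, _, _, _, _, e_cs, e_iso, e_mix, e_nw⟩ := pv_flush s '\n' (by decide)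
    simp only [List.nil_append, List.foldl_cons, List.foldl_nil]
    have hcs : (pvBStep s '\n').cs = s.cs := by rw [e_cs]; simp
    have hnp : (pvNpairs (if s.pend then [' '] else []) : Int) = 0 := by
      cases s.pend <;> simp [pvNpairs]
    match cur, hw, hu, hd, ha, hf with
    | [], hw, _, _, _, _ =>
      rw [hcs, e_iso, e_mix, e_nw, hnp]
      simp [PySem.Chars.split₀.go, hw]
    | c :: cu, hw, hu, hd, ha, hf =>
      have hne : (c :: cu) ≠ [] := by simp
      have hwne : s.wlen ≠ 0 := by rw [hw]; simp
      have hgo : PySem.Chars.split₀.go [] (c :: cu) [] = [(c :: cu).reverse] := by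
        simp [PySem.Chars.split₀.go]
      rw [hcs, e_iso, e_mix, e_nw, hnp, hgo]
      have hfst := hf hne
      refine ⟨by simp, ?_, ?_, ?_⟩
      · simp only [List.countP_cons, List.countP_nil, pv_iso_rev _ hne, ← hfst, ← hw]
        by_cases hB : (s.wlen == 1 && PySem.Chars.isalnum s.first) = true
        · rw [if_pos ⟨hwne, hB⟩, if_pos hB]; push_cast; ring
        · rw [if_neg (fun h => hB h.2), if_neg hB]; push_cast; ring
      · simp only [List.countP_cons, List.countP_nil, pv_mixed_rev _ hne, ← hfst, ← hw, ← hu]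
        by_cases hB : (PySem.Chars.islower s.first && s.upA) = true
        · rw [if_pos ⟨hwne, hB⟩, if_pos hB]; push_cast; ring
        · rw [if_neg (fun h => hB h.2), if_neg hB]; push_cast; ring
      · simp only [List.countP_cons, List.countP_nil, pv_num_rev, ← hd, ← ha]
        by_cases hB : (s.hasD && s.hasA) = true
        · rw [if_pos ⟨hwne, hB⟩, if_pos hB]; push_cast; ring
        · rw [if_neg (fun h => hB h.2), if_neg hB]; push_cast; ring
  | cons c t ih =>
    intro cur s hrel
    obtain ⟨hw, hu, hd, ha, hf⟩ := hrel
    simp only [List.cons_append, List.foldl_cons]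
    by_cases hsp : PySem.Chars.isspace c
    · obtain ⟨f_w, f_u, f_d, f_a, f_p, f_cs, f_iso, f_mix, f_nw⟩ := pv_flush s c hsp
      obtain ⟨g1, g2, g3, g4⟩ := ih [] (pvBStep s c) (by
        exact ⟨f_w, by simp [f_u], by simp [f_d], by simp [f_a], by simp⟩)
      rw [g1, g2, g3, g4]
      refine ⟨?_, ?_, ?_, ?_⟩
      · rw [f_cs, f_p, pv_np_step c t s.pend]
        split_ifs <;> push_cast <;> ring
      · rw [f_iso, pv_countP_flush _ t cur c hsp]
        have : (cur ≠ [] ∧ pvA_isolated cur.reverse)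
             ↔ (s.wlen ≠ 0 ∧ (s.wlen == 1 && PySem.Chars.isalnum s.first) = true) := by
          match cur, hw, hf with
          | [], hw, _ => simp [hw]
          | d :: cu, hw, hf =>
            rw [pv_iso_rev _ (by simp), hf (by simp), hw]
            simp
        rw [if_congr this.symm rfl rfl]
        split_ifs <;> push_cast <;> ring
      · rw [f_mix, pv_countP_flush _ t cur c hsp]
        have : (cur ≠ [] ∧ pvA_mixed cur.reverse)
             ↔ (s.wlen ≠ 0 ∧ (PySem.Chars.islower s.first && s.upA) = true) := by
          match cur, hw, hu, hf with
          | [], hw, _, _ => simp [hw]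
          | d :: cu, hw, hu, hf =>
            rw [pv_mixed_rev _ (by simp), hf (by simp), hw, hu]
            simp
        rw [if_congr this.symm rfl rfl]
        split_ifs <;> push_cast <;> ring
      · rw [f_nw, pv_countP_flush _ t cur c hsp]
        have : (cur ≠ [] ∧ pvA_numword cur.reverse)
             ↔ (s.wlen ≠ 0 ∧ (s.hasD && s.hasA) = true) := by
          match cur, hw, hd, ha with
          | [], hw, _, _ => simp [hw]
          | d :: cu, hw, hd, ha =>
            rw [pv_num_rev, hw, hd, ha]
            simp
        rw [if_congr this.symm rfl rfl]
        split_ifs <;> push_cast <;> ring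
    · obtain ⟨w_w, w_f, w_u, w_d, w_a, w_p, w_cs, w_iso, w_mix, w_nw⟩ :=
        pv_word s c (by simpa using hsp)
      have hrel' : PVRel (pvBStep s c) (c :: cur) := by
        refine ⟨by rw [w_w, hw]; simp, ?_, by rw [w_d, hd]; simp [Bool.or_comm],
          by rw [w_a, ha]; simp [Bool.or_comm], ?_⟩
        · rw [w_u]
          match cur, hw, hu with
          | [], hw, hu => simp [hw, hu]
          | d :: cu, hw, hu =>
            rw [if_neg (by rw [hw]; simp), hu]
            simp [Bool.or_comm]
        · intro _
          rw [w_f]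
          match cur, hw, hf with
          | [], hw, _ => simp [hw]
          | d :: cu, hw, hf =>
            rw [if_neg (by rw [hw]; simp), hf (by simp)]
            simp
      obtain ⟨g1, g2, g3, g4⟩ := ih (c :: cur) (pvBStep s c) hrel'
      have hgo : ∀ a, PySem.Chars.split₀.go (c :: t) cur a = PySem.Chars.split₀.go t (c :: cur) a := by
        intro a; simp [PySem.Chars.split₀.go, hsp]
      have hcne : c ≠ ' ' := by
        intro hh; rw [hh] at hsp; exact hsp (by decide)
      have hnp : (pvNpairs (if s.pend then ' ' :: c :: t else c :: t) : Int)
          = (pvNpairs (if (pvBStep s c).pend then ' ' :: t else t) : Int) := by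
        rw [w_p]
        cases hsp2 : s.pend <;>
          simp [pv_npairs_cons_of_ne c t hcne, pvNpairs, hcne]
      refine ⟨?_, ?_, ?_, ?_⟩
      · rw [g1, w_cs, hnp]
      · rw [g2, w_iso, hgo]
      · rw [g3, w_mix, hgo]
      · rw [g4, w_nw, hgo]

-- ===== VERDICT (by name: the statement is the Claim_ definition above) =====
theorem detect_common_ocr_errors_py_spec : Claim_equal_detect_common_ocr_errors_py := by
  intro text _
  unfold Spec_detect_common_ocr_errors_py detect_common_ocr_errors_py detect_common_ocr_errors_py_alt
  obtain ⟨h1, h2, h3, h4⟩ := pv_main text.toList [] pvB_init (by simp [PVRel, pvB_init])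
  simp only [pvB_init, Bool.false_eq_true, if_false, zero_add, List.foldl_append,
    List.foldl_cons, List.foldl_nil] at h1 h2 h3 h4
  simp only [PySem.Chars.split₀, PySem.List.sum_map_ite_one_zero]
  unfold pvB_init
  simp [h1, h2, h3, h4, pv_count_eq]
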